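/- GENERATED by tools/from_farm_form.py from farm/worked/sincos_quadrant/Proof.lean (a worked proof of the farm's unit `sincos_quadrant`,
   accepted by the verdict) — do not edit. -/
import ProgX.Base.Spec.Units.sincos_quadrant

open X86 X86.User Asan ProgX.Base

set_option maxRecDepth 4000
set_option maxHeartbeats 4000000

namespace ProgX.Base.Spec.Proved.sincos_quadrant
open ProgX.Base.Spec.sincos_quadrant (Statement)

/-- The shadow clause of a callee's precondition, at a state `s` deeper in the stack than the entry state `u` of this
function, whose memory differs from `u`'s by stack stores only. -/
theorem callee_pre_w {others : List Obj} {frames : List (Nat × FrameLayout)} {u s : State}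
    (hpre : ShadowPre others frames u) (hun : ShadowUntouched u.mem s.mem)
    (hle : (s.reg .rsp).toNat ≤ (u.reg .rsp).toNat) (h8 : ((s.reg .rsp).toNat + 8) % 8 = 0)
    (hlo : 0x700000 ≤ (s.reg .rsp).toNat + 8) : ShadowPre others frames s :=
  ⟨(hpre.inv.untouched hun).lower (by omega) h8 hlo, hpre.offText⟩

/-- A callee whose footprint is one EMPTY window (frame 0, no declared writes) returns with the memory it was entered with. -/
theorem mem_eq_of_same_empty_w {μ ν : Mem} {lo hi : Nat} (h : Mem.SameExcept [⟨lo, hi⟩] μ ν) (hle : hi ≤ lo) : ν = μ := by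
  apply Mem.ext
  intro a
  apply h a
  intro w hw
  rw [List.mem_singleton] at hw
  subst hw
  show a.toNat < lo ∨ hi ≤ a.toNat
  omega

end ProgX.Base.Spec.Proved.sincos_quadrant

/-- `sincos_quadrant(xmm0 = x, edi = shift)` satisfies its contract: two float guards (each failing arm returns 0.0), `push rbp ;
push rbx`, a call of `floor`, the quadrant `((int) k + shift) & 3` dispatched by three `je` and the fall-through to one call of
`sin_poly` / `cos_poly` (every arm is safe whatever the quadrant is), `pop rbx ; pop rbp ; ret`. No check site; the only stores are
the two pushes and the return addresses of the calls, all in the own 24-byte frame. -/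
theorem ProgX.Base.Spec.Proved.sincos_quadrant_ok : ProgX.Base.Spec.sincos_quadrant.Statement := by
  intro Lay hLay μ hμ u₀ hcode h_floor h_cos h_sin others frames u ret he hpre
  v_entry he
  have hsp := hpre.rsp
  have hfloor := h_floor others frames
  have hcos := h_cos others frames
  have hsin := h_sin others frames
  u_walk hcode [hμ.vendor] span [ProgX.Base.L.textLo, ProgX.Base.L.textHi] side (v_side)
  · -- 0x102483 `call floor` (libm.c:217): call_inv, DF and the MXCSR masks at the callee's entry
    v_inv
  · -- the precondition of `floor` at 0x102483: the shadow layer, deeper in the stack (three stack stores so far)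
    have hun : ShadowUntouched u.mem s_102483.mem := by v_untouched
    exact ProgX.Base.Spec.Proved.sincos_quadrant.callee_pre_w hpre hun (by u_omega) (by u_omega) (by u_omega)
  · -- 0x1024f2 (libm.c:215): `x > -2^30` failed, `pxor xmm0, xmm0 ; ret` with nothing pushed
    refine ReachVia.done ?_
    v_returned
    show ShadowUntouched u.mem _
    v_untouched
  · -- 0x1024f7 (libm.c:215): `x < 2^30` failed, `pxor xmm0, xmm0 ; pop rbx ; pop rbp ; ret`
    refine ReachVia.done ?_
    v_returned
    show ShadowUntouched u.mem _
    v_untouched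
  · -- cut1 = 0x102488, after the return of `floor` (libm.c:217): its footprint is empty, so the memory is that of its entry;
    -- the code span, SSE masks and DF are restated for the returned state, then the walk goes on to the four calls
    simp only [X86.User.Spec.footprint, vspec, w_rsp_102483] at w_same
    have w_eq := ProgX.Base.conv_code_eqOn w_code
    have w_mem := (ProgX.Base.Spec.Proved.sincos_quadrant.mem_eq_of_same_empty_w w_same (by omega)).trans w_mem_102483
    have he_sse' : SseOK s_102483r := ProgX.Base.sseOK_of_abiInv w_inv
    have hdf : s_102483r.flags .df = false := (show abiInv _ from w_inv).1
    have hmx : s_102483r.mxcsr &&& 0x1F80 = 0x1F80 := (show abiInv _ from w_inv).2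
    clear w_same w_post
    u_walk hcode [hμ.vendor] span [ProgX.Base.L.textLo, ProgX.Base.L.textHi] side (v_side)
    · -- call_inv of the call at 0x1024d5 (sin_poly)
      v_inv
    · -- the precondition of `sin_poly` at 0x1024d5: the shadow layer, deeper in the stack
      have hun : ShadowUntouched u.mem s_1024d5.mem := by v_untouched
      exact ProgX.Base.Spec.Proved.sincos_quadrant.callee_pre_w hpre hun (by u_omega) (by u_omega) (by u_omega)
    · -- call_inv of the call at 0x1024dc (cos_poly)
      v_inv
    · -- the precondition of `cos_poly` at 0x1024dc: the shadow layer, deeper in the stack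
      have hun : ShadowUntouched u.mem s_1024dc.mem := by v_untouched
      exact ProgX.Base.Spec.Proved.sincos_quadrant.callee_pre_w hpre hun (by u_omega) (by u_omega) (by u_omega)
    · -- call_inv of the call at 0x1024e3 (sin_poly)
      v_inv
    · -- the precondition of `sin_poly` at 0x1024e3: the shadow layer, deeper in the stack
      have hun : ShadowUntouched u.mem s_1024e3.mem := by v_untouched
      exact ProgX.Base.Spec.Proved.sincos_quadrant.callee_pre_w hpre hun (by u_omega) (by u_omega) (by u_omega)
    · -- call_inv of the call at 0x1024c6 (cos_poly)
      v_inv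
    · -- the precondition of `cos_poly` at 0x1024c6: the shadow layer, deeper in the stack
      have hun : ShadowUntouched u.mem s_1024c6.mem := by v_untouched
      exact ProgX.Base.Spec.Proved.sincos_quadrant.callee_pre_w hpre hun (by u_omega) (by u_omega) (by u_omega)
    · -- after the return of `sin_poly` called at 0x1024d5 (cut3 = 0x1024da, libm.c:221): `jmp` to `pop rbx ; pop rbp ; ret`
      simp only [X86.User.Spec.footprint, vspec, w_rsp_1024d5] at w_same
      have w_eq := ProgX.Base.conv_code_eqOn w_code
      have w_mem := (ProgX.Base.Spec.Proved.sincos_quadrant.mem_eq_of_same_empty_w w_same (by omega)).trans w_mem_1024d5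
      have he_sse'' : SseOK s_1024d5r := ProgX.Base.sseOK_of_abiInv w_inv
      have hdf' : s_1024d5r.flags .df = false := (show abiInv _ from w_inv).1
      have hmx' : s_1024d5r.mxcsr &&& 0x1F80 = 0x1F80 := (show abiInv _ from w_inv).2
      clear w_same w_post
      u_walk hcode [hμ.vendor] span [ProgX.Base.L.textLo, ProgX.Base.L.textHi] side (v_side)
      refine ReachVia.done ?_
      v_returned
      show ShadowUntouched u.mem _
      v_untouched
    · -- after the return of `cos_poly` called at 0x1024dc (cut4 = 0x1024e1, libm.c:224): `jmp` to `pop rbx ; pop rbp ; ret`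
      simp only [X86.User.Spec.footprint, vspec, w_rsp_1024dc] at w_same
      have w_eq := ProgX.Base.conv_code_eqOn w_code
      have w_mem := (ProgX.Base.Spec.Proved.sincos_quadrant.mem_eq_of_same_empty_w w_same (by omega)).trans w_mem_1024dc
      have he_sse'' : SseOK s_1024dcr := ProgX.Base.sseOK_of_abiInv w_inv
      have hdf' : s_1024dcr.flags .df = false := (show abiInv _ from w_inv).1
      have hmx' : s_1024dcr.mxcsr &&& 0x1F80 = 0x1F80 := (show abiInv _ from w_inv).2
      clear w_same w_post
      u_walk hcode [hμ.vendor] span [ProgX.Base.L.textLo, ProgX.Base.L.textHi] side (v_side)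
      refine ReachVia.done ?_
      v_returned
      show ShadowUntouched u.mem _
      v_untouched
    · -- after the return of `sin_poly` called at 0x1024e3 (cut5 = 0x1024e8, libm.c:227): `xorpd xmm0, [140000H]` (16-aligned), `pop rbx ; pop rbp ; ret`
      simp only [X86.User.Spec.footprint, vspec, w_rsp_1024e3] at w_same
      have w_eq := ProgX.Base.conv_code_eqOn w_code
      have w_mem := (ProgX.Base.Spec.Proved.sincos_quadrant.mem_eq_of_same_empty_w w_same (by omega)).trans w_mem_1024e3
      have he_sse'' : SseOK s_1024e3r := ProgX.Base.sseOK_of_abiInv w_inv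
      have hdf' : s_1024e3r.flags .df = false := (show abiInv _ from w_inv).1
      have hmx' : s_1024e3r.mxcsr &&& 0x1F80 = 0x1F80 := (show abiInv _ from w_inv).2
      clear w_same w_post
      u_walk hcode [hμ.vendor] span [ProgX.Base.L.textLo, ProgX.Base.L.textHi] side (v_side)
      refine ReachVia.done ?_
      v_returned
      show ShadowUntouched u.mem _
      v_untouched
    · -- after the return of `cos_poly` called at 0x1024c6 (cut2 = 0x1024cb, libm.c:229): `xorpd xmm0, [140000H]` (16-aligned), `pop rbx ; pop rbp ; ret`
      simp only [X86.User.Spec.footprint, vspec, w_rsp_1024c6] at w_same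
      have w_eq := ProgX.Base.conv_code_eqOn w_code
      have w_mem := (ProgX.Base.Spec.Proved.sincos_quadrant.mem_eq_of_same_empty_w w_same (by omega)).trans w_mem_1024c6
      have he_sse'' : SseOK s_1024c6r := ProgX.Base.sseOK_of_abiInv w_inv
      have hdf' : s_1024c6r.flags .df = false := (show abiInv _ from w_inv).1
      have hmx' : s_1024c6r.mxcsr &&& 0x1F80 = 0x1F80 := (show abiInv _ from w_inv).2
      clear w_same w_post
      u_walk hcode [hμ.vendor] span [ProgX.Base.L.textLo, ProgX.Base.L.textHi] side (v_side)
      refine ReachVia.done ?_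
      v_returned
      show ShadowUntouched u.mem _
      v_untouched
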